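-- pv_equiv track=rewrite | github.com/imindMan/advent-of-code | day5_part2.py | smallest_bounding
-- ===== SOURCE A (Python) =====
-- def smallest_bounding(data_input, node):
--     title_list = [
--             "seed-to-soil map:\n",
--             "soil-to-fertilizer map:\n",
--             "fertilizer-to-water map:\n",
--             "water-to-light map:\n",
--             "light-to-temperature map:\n",
--             "temperature-to-humidity map:\n",
--             "humidity-to-location map:\n"
--         ]
--
--     last_check_map = ""
--     current_map = ""
--     bound = None
--
--     check_range = []
--
--     last_des = 0
--     des = node
--     for i in range(len(data_input) - 1):
--         if data_input[i] == '\n':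
--             continue
--         if data_input[i] in title_list:
--             current_map = data_input[i]
--         else:
--             data = list(map(int, data_input[i].split(" ")))
--             destination_source = data[0]
--
--             range_source= data[1]
--             range_ = data[2]
--             if (range_source <= des <= range_source + range_ - 1) and (current_map != last_check_map):
--                 check_range.clear()
--                 if bound is None:
--                     bound = range_source + range_ - 1 - des
--                 else:
--                     bound = min(bound, range_source + range_ - 1 - des)
--                 last_des = des
--                 last_check_map = current_map
--                 check_range.append(range_source)
--                 check_range.append(range_source + range_ - 1)
--                 des = destination_source + (des - range_source)
--             elif i + 2 < len(data_input) and data_input[i] in title_list and last_des == des: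
--                 check_range.append(des)
--                 check_range.sort()
--                 if bound is None:
--                     bound = check_range[check_range.index(des) + 1] - check_range[check_range.index(des)]
--                 else:
--                     bound = min(bound, check_range[check_range.index(des) + 1] - check_range[check_range.index(des)])
--                 check_range.clear()
--
--     if bound is None:
--         bound = 0
--     return des, bound
-- ===== SOURCE B (Python) =====
-- def smallest_bounding(data_input, node):
--     titles = {
--         "seed-to-soil map:\n",
--         "soil-to-fertilizer map:\n",
--         "fertilizer-to-water map:\n",
--         "water-to-light map:\n",
--         "light-to-temperature map:\n",
--         "temperature-to-humidity map:\n",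
--         "humidity-to-location map:\n",
--     }
--     # Phase 1: parse into ordered sections (title, [(dest, src, length), ...]);
--     # the leading pseudo-section has title "" so its lines can never match.
--     sections = []
--     cur_title, cur_ranges = "", []
--     for line in data_input[:-1]:
--         if line == "\n":
--             continue
--         if line in titles:
--             sections.append((cur_title, cur_ranges))
--             cur_title, cur_ranges = line, []
--         else:
--             nums = [int(tok) for tok in line.split(" ")]
--             cur_ranges.append((nums[0], nums[1], nums[2]))
--     sections.append((cur_title, cur_ranges))
--     # Phase 2: walk the sections; in each not-just-matched section take the
--     # first range containing des.
--     last, bound, des = "", None, node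
--     for title, ranges in sections:
--         if title == last:
--             continue
--         hit = next((r for r in ranges if r[1] <= des <= r[1] + r[2] - 1), None)
--         if hit is not None:
--             dest, src, length = hit
--             b = src + length - 1 - des
--             bound = b if bound is None else min(bound, b)
--             des = dest + (des - src)
--             last = title
--     return des, (bound if bound is not None else 0)
-- ===== Notes on version B (the rewrite author's own statement) =====
-- stated objective: alternative
-- what changed: A's single-pass six-variable state machine (with a dead elif branch) is re-decomposed into two phases: parse the lines into ordered (title, ranges) sections, then walk the sections taking the first range that contains the current value; same cost, clearer structure.
-- outside the precondition, e.g. on smallest_bounding(['not a number', 'x'], 5): A raises ValueError, B raises ValueError; on smallest_bounding(['1 2', 'x'], 5): A raises IndexError, B raises IndexError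
import Mathlib
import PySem

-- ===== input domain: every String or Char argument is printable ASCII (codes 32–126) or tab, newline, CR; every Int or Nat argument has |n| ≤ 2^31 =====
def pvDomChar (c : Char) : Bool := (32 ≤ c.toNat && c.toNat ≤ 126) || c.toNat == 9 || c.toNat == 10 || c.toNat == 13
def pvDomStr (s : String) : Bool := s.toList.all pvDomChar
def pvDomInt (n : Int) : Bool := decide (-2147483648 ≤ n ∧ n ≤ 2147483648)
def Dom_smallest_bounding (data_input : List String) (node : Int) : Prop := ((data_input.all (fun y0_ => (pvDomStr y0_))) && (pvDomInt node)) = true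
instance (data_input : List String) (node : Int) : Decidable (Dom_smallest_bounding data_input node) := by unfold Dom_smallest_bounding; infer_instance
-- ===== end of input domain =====

-- B re-decomposes A's one-pass state machine into parse-into-sections then scan-each-section
-- (objective: simpler/alternative decomposition); equivalence is about the return value.

def titleList : List String :=
  [ "seed-to-soil map:\n",
    "soil-to-fertilizer map:\n",
    "fertilizer-to-water map:\n",
    "water-to-light map:\n",
    "light-to-temperature map:\n",
    "temperature-to-humidity map:\n",
    "humidity-to-location map:\n" ]

-- ===== PORT A =====
structure StA where
  lcm : String        -- last_check_map
  cm : String         -- current_map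
  bound : Option Int
  cr : List Int       -- check_range
  ld : Int            -- last_des
  des : Int
deriving Repr, DecidableEq

-- the loop 'for i in range(len(data_input) - 1)', line by line (lines carry their index i)
def loopA (n : Int) : List (Int × String) → StA → Option StA
  | [], s => some s
  | (i, line) :: rest, s =>
    if line = "\n" then loopA n rest s
    else if line ∈ titleList then loopA n rest { s with cm := line }
    else
      match (PySem.Str.split? line " ").bind (fun toks => toks.mapM PySem.Int.ofStr?) with
      | none => none                          -- ValueError from int(...)
      | some data =>
        match PySem.List.pyGet? data 0, PySem.List.pyGet? data 1, PySem.List.pyGet? data 2 with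
        | some destination_source, some range_source, some range_ =>
          if (range_source ≤ s.des ∧ s.des ≤ range_source + range_ - 1) ∧ s.cm ≠ s.lcm then
            let b := range_source + range_ - 1 - s.des
            let bound' := match s.bound with | none => b | some b0 => min b0 b
            loopA n rest
              { lcm := s.cm, cm := s.cm, bound := some bound',
                cr := [range_source, range_source + range_ - 1],
                ld := s.des, des := destination_source + (s.des - range_source) }
          else if i + 2 < n ∧ line ∈ titleList ∧ s.ld = s.des then
            -- transliterated 'elif' branch (its condition re-tests membership in title_list)
            let cr1 := PySem.List.sorted (s.cr ++ [s.des]) (fun x => x) false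
            match PySem.List.index? cr1 s.des with
            | none => none                    -- ValueError from .index
            | some idx =>
              match PySem.List.pyGet? cr1 ((idx : Int) + 1), PySem.List.pyGet? cr1 (idx : Int) with
              | some v1, some v0 =>
                let bound' := match s.bound with | none => v1 - v0 | some b0 => min b0 (v1 - v0)
                loopA n rest { s with bound := some bound', cr := [] }
              | _, _ => none                  -- IndexError
          else loopA n rest s
        | _, _, _ => none                     -- IndexError on data[0..2]

def smallest_bounding (data_input : List String) (node : Int) : Int × Int :=
  match loopA (data_input.length : Int)
      (PySem.List.enumerate (PySem.List.slice data_input none (some (-1))) 0)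
      { lcm := "", cm := "", bound := none, cr := [], ld := 0, des := node } with
  | some s => (s.des, s.bound.getD 0)
  | none => (0, 0)                            -- unreachable inside Pre_ (Python raises there)

-- ===== PORT B =====
-- phase 1: parse the lines (minus the last) into ordered sections (title, [(dest, src, len), …]);
-- the leading pseudo-section has title "" so it can never be matched
def parseB : List String → List (String × List (Int × Int × Int)) → String →
    List (Int × Int × Int) → Option (List (String × List (Int × Int × Int)))
  | [], done, ct, crs => some (done ++ [(ct, crs)])
  | line :: rest, done, ct, crs =>
    if line = "\n" then parseB rest done ct crs
    else if line ∈ titleList then parseB rest (done ++ [(ct, crs)]) line []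
    else
      match (PySem.Str.split? line " ").bind (fun toks => toks.mapM PySem.Int.ofStr?) with
      | none => none
      | some nums =>
        match PySem.List.pyGet? nums 0, PySem.List.pyGet? nums 1, PySem.List.pyGet? nums 2 with
        | some a, some b, some c => parseB rest done ct (crs ++ [(a, b, c)])
        | _, _, _ => none

-- phase 2: walk the sections; in each not-just-matched section take the first range containing des
def procB : List (String × List (Int × Int × Int)) → String → Option Int → Int →
    String × Option Int × Int
  | [], last, bound, des => (last, bound, des)
  | (t, rs) :: rest, last, bound, des =>
    if t = last then procB rest last bound des
    else
      match rs.find? (fun r => decide (r.2.1 ≤ des ∧ des ≤ r.2.1 + r.2.2 - 1)) with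
      | none => procB rest last bound des
      | some (dst, src, len_) =>
        let b := src + len_ - 1 - des
        procB rest t (some (match bound with | none => b | some b0 => min b0 b))
          (dst + (des - src))

def smallest_bounding_alt (data_input : List String) (node : Int) : Int × Int :=
  match parseB (PySem.List.slice data_input none (some (-1))) [] "" [] with
  | none => (0, 0)
  | some sections =>
    match procB sections "" none node with
    | (_, bound, des) => (des, bound.getD 0)

-- ===== PRECONDITION & SPEC =====
-- Pre_ excludes exactly the inputs on which Python A raises: a considered line (not '\n', not a
-- title) whose space-split tokens are not all int()-parsable or number fewer than three.
def Pre_smallest_bounding (data_input : List String) (node : Int) : Prop :=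
  ∀ line ∈ data_input.dropLast, line ≠ "\n" → line ∉ titleList →
    (((PySem.Str.split? line " ").bind (fun toks => toks.mapM PySem.Int.ofStr?)).isSome = true ∧
     3 ≤ (((PySem.Str.split? line " ").bind (fun toks => toks.mapM PySem.Int.ofStr?)).getD []).length)
instance (data_input : List String) (node : Int) : Decidable (Pre_smallest_bounding data_input node) := by
  unfold Pre_smallest_bounding; infer_instance

def pvWitness_smallest_bounding : List String × Int :=
  (["13 5 10\n", "seed-to-soil map:\n", "50 98 2\n", "98 50 10\n",
    "soil-to-fertilizer map:\n", "\n", "0 40 100\n", "last line ignored"], 98)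

def Spec_smallest_bounding (data_input : List String) (node : Int) (out : Int × Int) : Prop := out = smallest_bounding_alt data_input node
instance (data_input : List String) (node : Int) (out : Int × Int) : Decidable (Spec_smallest_bounding data_input node out) := by unfold Spec_smallest_bounding; infer_instance

-- ===== CLAIM (what is proved, stated in full; the proofs are below) =====
def Claim_equal_smallest_bounding : Prop := ∀ (data_input : List String) (node : Int), Dom_smallest_bounding data_input node → Pre_smallest_bounding data_input node → Spec_smallest_bounding data_input node (smallest_bounding data_input node)

-- ===== LEMMAS AND PROOFS =====

-- proof-side characterization of parseB without its accumulators: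
-- Psecs lines = (ranges of the currently open section, the later sections)
def Psecs : List String → Option (List (Int × Int × Int) × List (String × List (Int × Int × Int)))
  | [] => some ([], [])
  | line :: rest =>
    if line = "\n" then Psecs rest
    else if line ∈ titleList then
      (Psecs rest).map (fun p => ([], (line, p.1) :: p.2))
    else
      match (PySem.Str.split? line " ").bind (fun toks => toks.mapM PySem.Int.ofStr?) with
      | none => none
      | some nums =>
        match PySem.List.pyGet? nums 0, PySem.List.pyGet? nums 1, PySem.List.pyGet? nums 2 with
        | some a, some b, some c => (Psecs rest).map (fun p => ((a, b, c) :: p.1, p.2))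
        | _, _, _ => none

theorem parseB_eq (lines : List String) : ∀ (done : List (String × List (Int × Int × Int)))
    (ct : String) (crs : List (Int × Int × Int)),
    parseB lines done ct crs = (Psecs lines).map (fun p => done ++ (ct, crs ++ p.1) :: p.2) := by
  induction lines with
  | nil => intro done ct crs; simp [parseB, Psecs]
  | cons line rest ih =>
    intro done ct crs
    by_cases h1 : line = "\n"
    · simp [parseB, Psecs, h1, ih]
    · by_cases h2 : line ∈ titleList
      · cases hP : Psecs rest with
        | none => simp [parseB, Psecs, h1, h2, ih, hP]
        | some p => simp [parseB, Psecs, h1, h2, ih, hP]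
      · cases hm : (PySem.Str.split? line " ").bind (fun toks => toks.mapM PySem.Int.ofStr?) with
        | none => simp [parseB, Psecs, h1, h2, hm]
        | some nums =>
          cases h0 : PySem.List.pyGet? nums 0 with
          | none => simp [parseB, Psecs, h1, h2, hm, h0]
          | some a =>
            cases hb : PySem.List.pyGet? nums 1 with
            | none => simp [parseB, Psecs, h1, h2, hm, h0, hb]
            | some b =>
              cases hc : PySem.List.pyGet? nums 2 with
              | none => simp [parseB, Psecs, h1, h2, hm, h0, hb, hc]
              | some c =>
                cases hP : Psecs rest with
                | none => simp [parseB, Psecs, h1, h2, hm, h0, hb, hc, ih, hP]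
                | some p => simp [parseB, Psecs, h1, h2, hm, h0, hb, hc, ih, hP]

theorem procB_nilsec (t : String) (secs : List (String × List (Int × Int × Int)))
    (last : String) (bound : Option Int) (des : Int) :
    procB ((t, []) :: secs) last bound des = procB secs last bound des := by
  by_cases h : t = last <;> simp [procB, h, List.find?]

theorem procB_skip (t : String) (rs : List (Int × Int × Int))
    (secs : List (String × List (Int × Int × Int))) (bound : Option Int) (des : Int) :
    procB ((t, rs) :: secs) t bound des = procB secs t bound des := by
  simp [procB]

theorem procB_head_no_match (t : String) (r : Int × Int × Int) (rs : List (Int × Int × Int))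
    (secs : List (String × List (Int × Int × Int))) (last : String) (bound : Option Int) (des : Int)
    (hne : t ≠ last) (hr : ¬ (r.2.1 ≤ des ∧ des ≤ r.2.1 + r.2.2 - 1)) :
    procB ((t, r :: rs) :: secs) last bound des = procB ((t, rs) :: secs) last bound des := by
  have hpred : ¬ (decide (r.2.1 ≤ des ∧ des ≤ r.2.1 + r.2.2 - 1) = true) := by
    simpa using hr
  simp only [procB, if_neg hne]
  rw [List.find?_cons_of_neg (p := fun r => decide (r.2.1 ≤ des ∧ des ≤ r.2.1 + r.2.2 - 1))
    (a := r) (l := rs) hpred]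

theorem loopA_eq (lines : List (Int × String)) : ∀ (n : Int) (lcm cm : String)
    (bound : Option Int) (cr : List Int) (ld des : Int),
    (loopA n lines ⟨lcm, cm, bound, cr, ld, des⟩).map (fun s => (s.bound, s.des)) =
    (Psecs (lines.map Prod.snd)).map (fun p =>
      ((procB ((cm, p.1) :: p.2) lcm bound des).2.1,
       (procB ((cm, p.1) :: p.2) lcm bound des).2.2)) := by
  induction lines with
  | nil => intro n lcm cm bound cr ld des; simp [loopA, Psecs, procB]
  | cons p rest ih =>
    obtain ⟨i, line⟩ := p
    intro n lcm cm bound cr ld des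
    by_cases h1 : line = "\n"
    · simpa [loopA, Psecs, h1] using ih n lcm cm bound cr ld des
    · by_cases h2 : line ∈ titleList
      · have hrec := ih n lcm line bound cr ld des
        cases hP : Psecs (rest.map Prod.snd) with
        | none => simp_all [loopA, Psecs]
        | some q =>
          rw [hP, Option.map_some] at hrec
          simp [loopA, Psecs, h1, h2, hP, hrec, procB_nilsec]
      · cases hm : (PySem.Str.split? line " ").bind (fun toks => toks.mapM PySem.Int.ofStr?) with
        | none => simp [loopA, Psecs, h1, h2, hm]
        | some nums =>
          cases h0 : PySem.List.pyGet? nums 0 with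
          | none => simp [loopA, Psecs, h1, h2, hm, h0]
          | some dst =>
            cases hb : PySem.List.pyGet? nums 1 with
            | none => simp [loopA, Psecs, h1, h2, hm, h0, hb]
            | some src =>
              cases hc : PySem.List.pyGet? nums 2 with
              | none => simp [loopA, Psecs, h1, h2, hm, h0, hb, hc]
              | some len_ =>
                by_cases hcm : cm = lcm
                · -- section already matched: the line is a no-op on both sides
                  subst hcm
                  have hC : ¬ ((src ≤ des ∧ des ≤ src + len_ - 1) ∧ cm ≠ cm) :=
                    fun h => h.2 rfl
                  have hrec := ih n cm cm bound cr ld des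
                  cases hP : Psecs (rest.map Prod.snd) with
                  | none => simp_all [loopA, Psecs]
                  | some q =>
                    rw [hP, Option.map_some] at hrec
                    simp [loopA, Psecs, h1, h2, hm, h0, hb, hc, hP, hrec, procB_skip]
                · by_cases hr : src ≤ des ∧ des ≤ src + len_ - 1
                  · -- first hit in this section
                    have hC : (src ≤ des ∧ des ≤ src + len_ - 1) ∧ cm ≠ lcm := ⟨hr, hcm⟩
                    have hC2 : (src ≤ des ∧ des < src + len_) ∧ ¬ cm = lcm :=
                      ⟨⟨hr.1, by omega⟩, hcm⟩
                    have hrec := ih n cm cm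
                      (some (match bound with | none => src + len_ - 1 - des
                                              | some b0 => min b0 (src + len_ - 1 - des)))
                      [src, src + len_ - 1] des (dst + (des - src))
                    cases hP : Psecs (rest.map Prod.snd) with
                    | none => simp_all [loopA, Psecs]
                    | some q =>
                      rw [hP, Option.map_some] at hrec
                      simp [loopA, Psecs, h1, h2, hm, h0, hb, hc, hC, hC2, hP, hrec,
                        procB]
                  · -- head range does not contain des
                    have hC : ¬ ((src ≤ des ∧ des ≤ src + len_ - 1) ∧ cm ≠ lcm) :=
                      fun h => hr h.1
                    have hC2 : ¬ ((src ≤ des ∧ des < src + len_) ∧ ¬ cm = lcm) :=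
                      fun h => hr ⟨h.1.1, by have := h.1.2; omega⟩
                    have hrec := ih n lcm cm bound cr ld des
                    cases hP : Psecs (rest.map Prod.snd) with
                    | none => simp_all [loopA, Psecs]
                    | some q =>
                      rw [hP, Option.map_some] at hrec
                      rw [← procB_head_no_match cm (dst, src, len_) q.1 q.2 lcm bound des hcm hr] at hrec
                      simp [loopA, Psecs, h1, h2, hm, h0, hb, hc, hC2, hP, hrec]

-- ===== VERDICT (by name: the statement is the Claim_ definition above) =====
theorem smallest_bounding_spec : Claim_equal_smallest_bounding := by
  intro data_input node _hDom _hPre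
  unfold Spec_smallest_bounding smallest_bounding smallest_bounding_alt
  have hM := loopA_eq
    (PySem.List.enumerate (PySem.List.slice data_input none (some (-1))) 0)
    (data_input.length : Int) "" "" none [] 0 node
  rw [PySem.List.map_snd_enumerate] at hM
  have hB := parseB_eq (PySem.List.slice data_input none (some (-1))) [] "" []
  cases hP : Psecs (PySem.List.slice data_input none (some (-1))) with
  | none =>
    rw [hP] at hM hB
    simp only [Option.map_none, Option.map_eq_none_iff] at hM
    rw [hM, hB]
    simp
  | some q =>
    rw [hP] at hM hB
    simp only [Option.map_some, List.nil_append] at hM hB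
    cases hA : loopA (data_input.length : Int)
        (PySem.List.enumerate (PySem.List.slice data_input none (some (-1))) 0)
        ⟨"", "", none, [], 0, node⟩ with
    | none => rw [hA] at hM; simp at hM
    | some s =>
      rw [hA] at hM
      simp only [Option.map_some, Option.some_inj] at hM
      rw [hB]
      cases hQ : procB (("", q.1) :: q.2) "" none node with
      | mk a bc =>
        rw [hQ] at hM
        obtain ⟨b, c⟩ := bc
        have h1 : s.bound = b := congrArg Prod.fst hM
        have h2 : s.des = c := congrArg Prod.snd hM
        simp [hQ, h1, h2]
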